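-- pv_equiv track=rewrite | github.com/E-qin/GEAR | utils/Jieba_split_wash_words.py | remove_stop_ty
-- ===== SOURCE A (Python) =====
-- stop_ty = ['r','nr','ns','t','w','m','q','un']
--
-- def remove_stop_ty(tagwordlist,stopkeys):
--     res = []
--     for w, ty in tagwordlist:
--         if ty not in stop_ty:
--             _stop = False
--             for stopkey in stopkeys:
--                 if stopkey in w:
--                     _stop = True
--                     break
--             if _stop == False:
--                 res.append((w,ty))
--     return res
-- ===== SOURCE B (Python) =====
-- stop_ty = ['r','nr','ns','t','w','m','q','un']
-- _STOP = set(stop_ty)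
--
-- def remove_stop_ty(tagwordlist, stopkeys):
--     # Successive filtering: drop stop-typed pairs first, then narrow the
--     # survivor list once per stopkey with a comprehension.
--     res = [p for p in tagwordlist if p[1] not in _STOP]
--     for stopkey in stopkeys:
--         res = [p for p in res if stopkey not in p[0]]
--     return res
-- ===== Notes on version B (the rewrite author's own statement) =====
-- stated objective: simpler
-- what changed: Replaces A's per-word inner stopkey scan with a break flag by successive filtering: drop stop-typed pairs first (stop_ty as a set), then narrow the survivor list once per stopkey with a comprehension.
import Mathlib
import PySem

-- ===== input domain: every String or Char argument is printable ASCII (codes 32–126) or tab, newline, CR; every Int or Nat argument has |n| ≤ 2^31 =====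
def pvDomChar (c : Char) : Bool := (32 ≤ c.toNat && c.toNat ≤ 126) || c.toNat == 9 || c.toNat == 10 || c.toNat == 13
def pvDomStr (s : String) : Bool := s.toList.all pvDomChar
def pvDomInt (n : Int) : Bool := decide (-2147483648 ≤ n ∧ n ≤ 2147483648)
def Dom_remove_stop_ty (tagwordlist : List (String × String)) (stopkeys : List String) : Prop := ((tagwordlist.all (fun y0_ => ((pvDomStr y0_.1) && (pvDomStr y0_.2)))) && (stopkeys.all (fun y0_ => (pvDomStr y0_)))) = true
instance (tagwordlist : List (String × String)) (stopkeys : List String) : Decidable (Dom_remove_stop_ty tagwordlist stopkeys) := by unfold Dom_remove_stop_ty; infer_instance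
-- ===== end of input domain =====

-- B replaces A's per-word inner stopkey scan with a break flag by successive filtering:
-- drop stop-typed pairs, then narrow the survivor list once per stopkey; objective: simpler.

-- ===== PORT A =====
def pv_stop_ty : List String := ["r", "nr", "ns", "t", "w", "m", "q", "un"]

-- inner loop: `_stop = False; for stopkey in stopkeys: if stopkey in w: _stop = True; break`
def pvInnerStop (w : String) : List String → Bool
  | [] => false
  | k :: rest => if PySem.Str.isIn k w then true else pvInnerStop w rest

def remove_stop_ty (tagwordlist : List (String × String)) (stopkeys : List String) : List (String × String) :=
  tagwordlist.foldl
    (fun res p =>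
      if ¬ (pv_stop_ty.contains p.2) then
        (if pvInnerStop p.1 stopkeys == false then res ++ [p] else res)
      else res)
    []

-- ===== PORT B =====
def pv_STOP : PySem.Set String := PySem.Set.ofList pv_stop_ty

def remove_stop_ty_alt (tagwordlist : List (String × String)) (stopkeys : List String) : List (String × String) :=
  stopkeys.foldl
    (fun res k => res.filter (fun p => !(PySem.Str.isIn k p.1)))
    (tagwordlist.filter (fun p => !(PySem.Set.contains pv_STOP p.2)))

-- ===== PRECONDITION & SPEC =====
def Spec_remove_stop_ty (tagwordlist : List (String × String)) (stopkeys : List String) (out : List (String × String)) : Prop := out = remove_stop_ty_alt tagwordlist stopkeys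
instance (tagwordlist : List (String × String)) (stopkeys : List String) (out : List (String × String)) : Decidable (Spec_remove_stop_ty tagwordlist stopkeys out) := by unfold Spec_remove_stop_ty; infer_instance

-- ===== CLAIM (what is proved, stated in full; the proofs are below) =====
def Claim_equal_remove_stop_ty : Prop := ∀ (tagwordlist : List (String × String)) (stopkeys : List String), Dom_remove_stop_ty tagwordlist stopkeys → Spec_remove_stop_ty tagwordlist stopkeys (remove_stop_ty tagwordlist stopkeys)

-- ===== LEMMAS AND PROOFS =====

-- the common form both sides reduce to
def pvKeep (stopkeys : List String) (p : String × String) : Bool :=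
  !(pv_stop_ty.contains p.2) && !(stopkeys.any (fun k => PySem.Str.isIn k p.1))

-- A's inner break-loop is `any`
theorem pvInnerStop_eq_any (w : String) (ks : List String) :
    pvInnerStop w ks = ks.any (fun k => PySem.Str.isIn k w) := by
  induction ks with
  | nil => rfl
  | cons k r ih => simp [pvInnerStop, ih]

-- an append-accumulating fold with a boolean keep-test is a filter
theorem pvFoldFilter {α : Type} (f : α → Bool) (l : List α) (acc : List α) :
    l.foldl (fun res x => if f x then res ++ [x] else res) acc = acc ++ l.filter f := by
  induction l generalizing acc with
  | nil => simp
  | cons q t ih => cases h : f q <;> simp [h, ih]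

theorem remove_stop_ty_eq_filter (tw : List (String × String)) (ks : List String) :
    remove_stop_ty tw ks = tw.filter (pvKeep ks) := by
  unfold remove_stop_ty
  have hf : (fun (res : List (String × String)) p =>
      if ¬ (pv_stop_ty.contains p.2) then
        (if pvInnerStop p.1 ks == false then res ++ [p] else res)
      else res)
      = (fun res p => if pvKeep ks p then res ++ [p] else res) := by
    funext res p
    simp only [pvKeep, pvInnerStop_eq_any]
    split_ifs <;> simp_all
    rename_i hex hall
    obtain ⟨x, hx1, hx2⟩ := hex
    exact absurd (hall x hx1) (by simp [hx2])
  rw [hf]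
  simpa using pvFoldFilter (pvKeep ks) tw []

-- a fold of per-key filters is one filter by the conjunction
theorem pvFoldFilterAll (ks : List String) (l : List (String × String)) :
    ks.foldl (fun res k => res.filter (fun p => !(PySem.Str.isIn k p.1))) l
    = l.filter (fun p => ks.all (fun k => !(PySem.Str.isIn k p.1))) := by
  induction ks generalizing l with
  | nil => simp
  | cons k r ih =>
    simp only [List.foldl_cons]
    rw [ih, List.filter_filter]
    apply List.filter_congr
    intro p _
    simp [Bool.and_comm]

theorem remove_stop_ty_alt_eq_filter (tw : List (String × String)) (ks : List String) :
    remove_stop_ty_alt tw ks = tw.filter (pvKeep ks) := by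
  unfold remove_stop_ty_alt
  rw [pvFoldFilterAll, List.filter_filter]
  apply List.filter_congr
  intro p _
  simp [pvKeep, pv_STOP, PySem.Set.mem_ofList, Bool.and_comm, List.all_eq_not_any_not]

-- ===== VERDICT (by name: the statement is the Claim_ definition above) =====
theorem remove_stop_ty_spec : Claim_equal_remove_stop_ty := by
  intro tw ks _
  unfold Spec_remove_stop_ty
  rw [remove_stop_ty_eq_filter, remove_stop_ty_alt_eq_filter]
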